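-- pv_equiv track=rewrite | github.com/RuihaoQiu/Machine-learning-model-deployment | postprocess.py | get_all_bskill_index
-- ===== SOURCE A (Python) =====
-- def get_all_bskill_index(labeled_tokens):
--     bskill_index = [
--         i
--         for i, (token, labels_pred) in enumerate(labeled_tokens)
--         if labels_pred == "B-SKILL"
--     ]
--     bskill_index.append(len(labeled_tokens))
--     return [
--         (bskill_index[i], bskill_index[i + 1]) for i in range(len(bskill_index) - 1)
--     ]
-- ===== SOURCE B (Python) =====
-- def get_all_bskill_index(labeled_tokens):
--     result = []
--     prev = None
--     for i, (token, labels_pred) in enumerate(labeled_tokens):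
--         if labels_pred == "B-SKILL":
--             if prev is not None:
--                 result.append((prev, i))
--             prev = i
--     if prev is not None:
--         result.append((prev, len(labeled_tokens)))
--     return result
-- ===== Notes on version B (the rewrite author's own statement) =====
-- stated objective: alternative
-- what changed: Single streaming pass that emits each consecutive (prev, next) pair as the next B-SKILL index is found, instead of materialising the full index list, appending len, and zipping it with itself in a second range pass.
import Mathlib
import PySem

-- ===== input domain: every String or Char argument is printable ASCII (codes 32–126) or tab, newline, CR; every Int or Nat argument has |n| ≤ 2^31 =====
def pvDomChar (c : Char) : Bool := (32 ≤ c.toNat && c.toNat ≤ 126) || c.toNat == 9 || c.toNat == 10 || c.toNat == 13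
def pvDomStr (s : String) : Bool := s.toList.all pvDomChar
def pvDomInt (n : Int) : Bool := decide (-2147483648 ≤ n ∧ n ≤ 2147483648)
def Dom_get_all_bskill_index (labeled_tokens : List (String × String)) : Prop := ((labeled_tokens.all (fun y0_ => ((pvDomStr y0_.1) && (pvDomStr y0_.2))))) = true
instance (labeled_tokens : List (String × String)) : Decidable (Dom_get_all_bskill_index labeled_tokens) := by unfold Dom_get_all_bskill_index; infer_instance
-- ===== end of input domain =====

-- B is an alternative decomposition of the same O(n) task: one streaming pass emitting
-- each consecutive pair directly, instead of A's build-index-list-then-zip; not claimed faster.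

-- ===== PORT A =====
-- list comprehension over enumerate, filtered on the label
def pvIdx (labeled_tokens : List (String × String)) (s : Int) : List Int :=
  ((PySem.List.enumerate labeled_tokens s).filter (fun p => p.2.2 == "B-SKILL")).map (·.1)

def get_all_bskill_index (labeled_tokens : List (String × String)) : List (Int × Int) :=
  -- bskill_index = [...comprehension...]; bskill_index.append(len(labeled_tokens))
  let bskill_index : List Int := pvIdx labeled_tokens 0 ++ [(labeled_tokens.length : Int)]
  -- [(bskill_index[i], bskill_index[i+1]) for i in range(len(bskill_index) - 1)]
  (PySem.List.pyRange 0 ((bskill_index.length : Int) - 1) 1).map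
    (fun i => (PySem.List.pyGetD bskill_index i 0, PySem.List.pyGetD bskill_index (i + 1) 0))

-- ===== PORT B =====
-- streaming loop: i is the current index, prev the last B-SKILL index seen (None initially);
-- on each B-SKILL emit (prev, i) if prev ≠ None, then prev := i; at the end emit (prev, len)
def pvAltLoop : List (String × String) → Int → Option Int → List (Int × Int)
  | [], _, none => []
  | [], i, some p => [(p, i)]
  | (_, lab) :: rest, i, prev =>
      if lab == "B-SKILL" then
        (match prev with | none => [] | some p => [(p, i)]) ++ pvAltLoop rest (i + 1) (some i)
      else
        pvAltLoop rest (i + 1) prev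

def get_all_bskill_index_alt (labeled_tokens : List (String × String)) : List (Int × Int) :=
  pvAltLoop labeled_tokens 0 none

-- ===== PRECONDITION & SPEC =====
def Spec_get_all_bskill_index (labeled_tokens : List (String × String)) (out : List (Int × Int)) : Prop := out = get_all_bskill_index_alt labeled_tokens
instance (labeled_tokens : List (String × String)) (out : List (Int × Int)) : Decidable (Spec_get_all_bskill_index labeled_tokens out) := by unfold Spec_get_all_bskill_index; infer_instance

-- ===== CLAIM (what is proved, stated in full; the proofs are below) =====
def Claim_equal_get_all_bskill_index : Prop := ∀ (labeled_tokens : List (String × String)), Dom_get_all_bskill_index labeled_tokens → Spec_get_all_bskill_index labeled_tokens (get_all_bskill_index labeled_tokens)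

-- ===== LEMMAS AND PROOFS =====

/-- Adjacent pairs of a list: the common characterisation both ports are reduced to. -/
def adjPairs : List Int → List (Int × Int)
  | a :: b :: rest => (a, b) :: adjPairs (b :: rest)
  | _ => []

theorem pvIdx_nil (s : Int) : pvIdx [] s = [] := rfl

theorem pvIdx_cons (t lab : String) (rest : List (String × String)) (s : Int) :
    pvIdx ((t, lab) :: rest) s =
      if lab == "B-SKILL" then s :: pvIdx rest (s + 1) else pvIdx rest (s + 1) := by
  simp only [pvIdx, PySem.List.enumerate_cons, List.filter_cons]
  by_cases h : lab == "B-SKILL" <;> simp [h]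

/-- B's loop computes the adjacent pairs of (prev?) ++ indices ++ [end index]. -/
theorem pvAltLoop_eq (ts : List (String × String)) :
    ∀ (i : Int) (prev : Option Int),
      pvAltLoop ts i prev =
        adjPairs ((prev.elim [] (fun p => [p])) ++ pvIdx ts i ++ [i + (ts.length : Int)]) := by
  induction ts with
  | nil =>
    intro i prev
    cases prev <;> simp [pvAltLoop, pvIdx_nil, adjPairs]
  | cons hd tl ih =>
    intro i prev
    obtain ⟨t, lab⟩ := hd
    by_cases h : lab == "B-SKILL"
    · cases prev with
      | none =>
        simp only [pvAltLoop, h, if_pos, pvIdx_cons, Option.elim, List.nil_append,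
          ih (i + 1) (some i)]
        have : i + ((tl.length : Int) + 1) = (i + 1) + (tl.length : Int) := by ring
        simp [this]
      | some p =>
        simp only [pvAltLoop, h, if_pos, pvIdx_cons, Option.elim, ih (i + 1) (some i)]
        have : i + ((tl.length : Int) + 1) = (i + 1) + (tl.length : Int) := by ring
        simp [adjPairs, this]
    · cases prev with
      | none =>
        simp only [pvAltLoop, h, pvIdx_cons, Option.elim, List.nil_append, ih (i + 1) none]
        simp
        ring_nf
      | some p =>
        simp only [pvAltLoop, h, pvIdx_cons, Option.elim, ih (i + 1) (some p)]
        simp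
        ring_nf

/-- A's zip-by-range over any Int list is its list of adjacent pairs. -/
theorem range_zip_eq_adjPairs (l : List Int) :
    (PySem.List.pyRange 0 ((l.length : Int) - 1) 1).map
      (fun i => (PySem.List.pyGetD l i 0, PySem.List.pyGetD l (i + 1) 0)) = adjPairs l := by
  induction l with
  | nil => simp [PySem.List.pyRange_one_eq_nil, adjPairs]
  | cons a tl ih =>
    cases tl with
    | nil => simp [PySem.List.pyRange_one_eq_nil, adjPairs]
    | cons b rest =>
      have hlen : ((a :: b :: rest).length : Int) - 1 = ((b :: rest).length : Int) := by
        simp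
      rw [hlen]
      have hpos : (0 : Int) < ((b :: rest).length : Int) := by
        simp
      rw [PySem.List.pyRange_one_cons hpos]
      have hshift : PySem.List.pyRange (0 + 1) ((b :: rest).length : Int) 1 =
          (PySem.List.pyRange 0 (((b :: rest).length : Int) - 1) 1).map (· + 1) := by
        simp only [PySem.List.pyRange_one, List.map_map]
        norm_num [Function.comp]
        intro x _
        ring
      rw [hshift, List.map_cons, List.map_map]
      have hfun : ∀ i ∈ PySem.List.pyRange 0 (((b :: rest).length : Int) - 1) 1,
          ((fun i => (PySem.List.pyGetD (a :: b :: rest) i 0,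
              PySem.List.pyGetD (a :: b :: rest) (i + 1) 0)) ∘ (· + 1)) i =
            (fun i => (PySem.List.pyGetD (b :: rest) i 0,
              PySem.List.pyGetD (b :: rest) (i + 1) 0)) i := by
        intro i hi
        have h0 : 0 ≤ i := (PySem.List.mem_pyRange_one.mp hi).1
        obtain ⟨k, rfl⟩ := Int.eq_ofNat_of_zero_le h0
        simp [Function.comp]
        constructor
        · have : (k : Int) + 1 = ((k + 1 : Nat) : Int) := by push_cast; ring
          rw [this, PySem.List.pyGetD_natCast]
          simp [List.getD]
        · have : (k : Int) + 1 + 1 = ((k + 2 : Nat) : Int) := by push_cast; ring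
          rw [this]
          have h2 : (k : Int) + 1 = ((k + 1 : Nat) : Int) := by push_cast; ring
          rw [h2, PySem.List.pyGetD_natCast, PySem.List.pyGetD_natCast]
          simp [List.getD]
      rw [List.map_congr_left hfun, ih]
      have h1 : PySem.List.pyGetD (a :: b :: rest) 1 0 = b := by
        rw [show (1 : Int) = ((1 : Nat) : Int) by norm_num, PySem.List.pyGetD_natCast]
        simp [List.getD]
      simp [adjPairs, PySem.List.pyGetD_zero_cons, h1]

-- ===== VERDICT (by name: the statement is the Claim_ definition above) =====
theorem get_all_bskill_index_spec : Claim_equal_get_all_bskill_index := by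
  intro lt _
  unfold Spec_get_all_bskill_index get_all_bskill_index get_all_bskill_index_alt
  rw [range_zip_eq_adjPairs, pvAltLoop_eq]
  simp
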